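-- pv_equiv track=rewrite | github.com/EZEORG/Spider_DCD | app/sqlite_dcd.py | make_unique_fieldnames
-- ===== SOURCE A (Python) =====
-- from collections import Counter
--
-- def make_unique_fieldnames(fieldnames):
--     """处理重复的列名，确保每个列名在表中唯一"""
--     counts = Counter(fieldnames)
--     result = []
--     suffix_counters = {}
--
--     for name in fieldnames:
--         if counts[name] > 1:
--             if name not in suffix_counters:
--                 suffix_counters[name] = 1
--             else:
--                 suffix_counters[name] += 1
--             unique_name = f"{name}_{suffix_counters[name]}"
--             result.append(unique_name)
--         else:
--             result.append(name)
--
--     return result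
-- ===== SOURCE B (Python) =====
-- def make_unique_fieldnames(fieldnames):
--     """处理重复的列名，确保每个列名在表中唯一"""
--     groups = {}
--     for i, name in enumerate(fieldnames):
--         groups.setdefault(name, []).append(i)
--     result = list(fieldnames)
--     for name, idxs in groups.items():
--         if len(idxs) > 1:
--             for j, i in enumerate(idxs, 1):
--                 result[i] = f"{name}_{j}"
--     return result
-- ===== Notes on version B (the rewrite author's own statement) =====
-- stated objective: alternative
-- what changed: Replaces the Counter plus per-name running suffix counter with an index-then-fill strategy: one pass groups the occurrence indices of each name, then duplicated groups are rewritten in place into a copy of the list by position.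
import Mathlib
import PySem

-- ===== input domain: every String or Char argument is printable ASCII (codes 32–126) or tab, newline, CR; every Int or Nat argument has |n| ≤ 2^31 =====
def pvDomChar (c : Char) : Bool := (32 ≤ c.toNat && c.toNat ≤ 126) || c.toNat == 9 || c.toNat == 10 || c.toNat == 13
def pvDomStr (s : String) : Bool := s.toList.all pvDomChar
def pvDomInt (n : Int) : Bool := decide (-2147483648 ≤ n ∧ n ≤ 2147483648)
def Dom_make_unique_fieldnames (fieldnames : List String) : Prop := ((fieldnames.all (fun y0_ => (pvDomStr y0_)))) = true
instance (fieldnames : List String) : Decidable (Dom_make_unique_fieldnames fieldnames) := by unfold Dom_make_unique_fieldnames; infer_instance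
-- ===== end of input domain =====

-- B replaces A's Counter + per-name running suffix counter with an index-then-fill strategy:
-- one pass groups the occurrence indices of each name, then duplicated groups are rewritten
-- in place into a copy of the list by position (alternative decomposition, not faster).

-- f"{name}_{k}" (shared formatting step of both ports)
def mkSuffixed (name : String) (k : Int) : String :=
  String.ofList (name.toList ++ '_' :: PySem.Int.toChars k)

-- ===== PORT A =====
def make_unique_fieldnames (fieldnames : List String) : List String :=
  let counts := PySem.Dict.counter fieldnames
  (fieldnames.foldl
    (fun (st : List String × PySem.Dict String Int) name =>
      if counts.getD name 0 > 1 then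
        let sc := if st.2.contains name = false
                  then st.2.insert name 1
                  else st.2.insert name (st.2.getD name 0 + 1)
        (st.1 ++ [mkSuffixed name (sc.getD name 0)], sc)
      else
        (st.1 ++ [name], st.2))
    ([], PySem.Dict.empty)).1

-- ===== PORT B =====
-- 'groups.setdefault(name, []).append(i)' is Dict.modify with default [];
-- 'result[i] = …' is pySetD: exact here since every i comes from enumerate(fieldnames),
-- hence is a valid non-negative index (Python's assignment never raises on these inputs).
def make_unique_fieldnames_alt (fieldnames : List String) : List String :=
  let groups : PySem.Dict String (List Int) :=
    (PySem.List.enumerate fieldnames).foldl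
      (fun g p => g.modify p.2 [] (fun l => l ++ [p.1])) PySem.Dict.empty
  groups.items.foldl
    (fun (result : List String) pair =>
      if pair.2.length > 1 then
        (PySem.List.enumerate pair.2 1).foldl
          (fun r q => PySem.List.pySetD r q.2 (mkSuffixed pair.1 q.1)) result
      else result)
    fieldnames

-- ===== PRECONDITION & SPEC =====
def Spec_make_unique_fieldnames (fieldnames : List String) (out : List String) : Prop := out = make_unique_fieldnames_alt fieldnames
instance (fieldnames : List String) (out : List String) : Decidable (Spec_make_unique_fieldnames fieldnames out) := by unfold Spec_make_unique_fieldnames; infer_instance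

-- ===== CLAIM (what is proved, stated in full; the proofs are below) =====
def Claim_equal_make_unique_fieldnames : Prop := ∀ (fieldnames : List String), Dom_make_unique_fieldnames fieldnames → Spec_make_unique_fieldnames fieldnames (make_unique_fieldnames fieldnames)

-- ===== LEMMAS AND PROOFS =====

-- the element both programs emit for a name whose running prefix-count (incl. itself) is k
def mkF (full : List String) (n : String) (k : Nat) : String :=
  if full.count n = 1 then n else mkSuffixed n (k : Int)

-- reference result, recursing on the remaining names with pc = counts over the processed prefix
def bAux (full : List String) (pc : String → Nat) : List String → List String
  | [] => []
  | n :: rest => mkF full n (pc n + 1) :: bAux full (fun s => pc s + (if s = n then 1 else 0)) rest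

lemma count_append_singleton (p : List String) (n s : String) :
    List.count s (p ++ [n]) = List.count s p + (if s = n then 1 else 0) := by
  by_cases h : s = n
  · simp [List.count_append, h]
  · simp [List.count_append, h, Ne.symm h]

-- A's loop body, with the Counter of the full list inlined
def stepA (full : List String) (st : List String × PySem.Dict String Int) (name : String) :
    List String × PySem.Dict String Int :=
  if (PySem.Dict.counter full).getD name 0 > 1 then
    let sc := if st.2.contains name = false
              then st.2.insert name 1
              else st.2.insert name (st.2.getD name 0 + 1)
    (st.1 ++ [mkSuffixed name (sc.getD name 0)], sc)
  else
    (st.1 ++ [name], st.2)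

lemma A_eq_foldl (fieldnames : List String) :
    make_unique_fieldnames fieldnames
      = (fieldnames.foldl (stepA fieldnames) ([], PySem.Dict.empty)).1 := rfl

lemma A_gen (full : List String) : ∀ (rest p acc : List String) (d : PySem.Dict String Int),
    full = p ++ rest →
    (∀ s, 1 < full.count s → d.contains s = decide (p.count s ≠ 0) ∧ d.getD s 0 = (p.count s : Int)) →
    (rest.foldl (stepA full) (acc, d)).1 = acc ++ bAux full (fun s => p.count s) rest := by
  intro rest
  induction rest with
  | nil => intro p acc d _ _; simp [bAux]
  | cons n rest' ih =>
    intro p acc d hfull hinv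
    have hmem : n ∈ full := by rw [hfull]; simp
    have hpos : 1 ≤ full.count n := List.one_le_count_iff.mpr hmem
    rw [List.foldl_cons]
    by_cases hc : 1 < full.count n
    · have hstep : stepA full (acc, d) n
          = (acc ++ [mkSuffixed n ((p.count n + 1 : Nat) : Int)],
             d.insert n ((p.count n + 1 : Nat) : Int)) := by
        unfold stepA
        rw [PySem.Dict.getD_counter]
        rw [if_pos (by exact_mod_cast hc)]
        obtain ⟨hcon, hgd⟩ := hinv n hc
        by_cases hz : p.count n = 0
        · rw [hcon, hz]
          simp [PySem.Dict.getD_insert_self]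
        · rw [hcon]
          simp only [decide_eq_false_iff_not, not_not, hz, hgd]
          simp [PySem.Dict.getD_insert_self]
      rw [hstep, ih (p ++ [n]) _ _ (by rw [hfull]; simp)]
      · rw [bAux]
        have : mkF full n (p.count n + 1) = mkSuffixed n ((p.count n + 1 : Nat) : Int) := by
          unfold mkF; rw [if_neg (by omega)]
        rw [this]
        have hpc : (fun s => (p ++ [n]).count s)
            = fun s => p.count s + (if s = n then 1 else 0) := by
          funext s; rw [count_append_singleton]
        rw [hpc]; simp
      · intro s hs
        by_cases hsn : s = n
        · subst hsn
          rw [PySem.Dict.contains_insert, PySem.Dict.getD_insert_self]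
          constructor
          · simp [List.count_append]
          · simp [List.count_append]
        · rw [PySem.Dict.contains_insert,
              PySem.Dict.getD_insert_of_ne _ _ _ hsn]
          have := hinv s hs
          constructor
          · rw [this.1]; simp [hsn, Ne.symm hsn]
          · rw [this.2, count_append_singleton]; simp [hsn]
    · have hone : full.count n = 1 := by omega
      have hstep : stepA full (acc, d) n = (acc ++ [n], d) := by
        unfold stepA
        rw [PySem.Dict.getD_counter]
        rw [if_neg (by exact_mod_cast hc)]
      rw [hstep, ih (p ++ [n]) _ _ (by rw [hfull]; simp)]
      · rw [bAux]
        have : mkF full n (p.count n + 1) = n := by unfold mkF; rw [if_pos hone]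
        rw [this]
        have hpc : (fun s => (p ++ [n]).count s)
            = fun s => p.count s + (if s = n then 1 else 0) := by
          funext s; rw [count_append_singleton]
        rw [hpc]; simp
      · intro s hs
        have hsn : s ≠ n := by rintro rfl; omega
        have := hinv s hs
        constructor
        · rw [this.1, count_append_singleton]; simp [hsn]
        · rw [this.2, count_append_singleton]; simp [hsn]

lemma bAux_length (full : List String) :
    ∀ (rest : List String) (pc : String → Nat), (bAux full pc rest).length = rest.length := by
  intro rest
  induction rest with
  | nil => intro pc; simp [bAux]
  | cons n rest' ih => intro pc; simp [bAux, ih]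

lemma bAux_getElem? (full : List String) :
    ∀ (rest : List String) (pc : String → Nat) (k : Nat) (_ : k < rest.length),
    (bAux full pc rest)[k]? =
      (rest[k]?).map (fun x => mkF full x (pc x + (rest.take k).count x + 1)) := by
  intro rest
  induction rest with
  | nil => intro pc k hk; simp at hk
  | cons n rest' ih =>
    intro pc k hk
    cases k with
    | zero => simp [bAux]
    | succ k' =>
      have hk' : k' < rest'.length := by simpa using hk
      simp only [bAux, List.getElem?_cons_succ, List.take_succ_cons]
      rw [ih _ k' hk']
      cases hx : rest'[k']? with
      | none => simp
      | some x =>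
        simp only [Option.map_some, Option.some.injEq]
        have harg : pc x + (if x = n then 1 else 0) + (rest'.take k').count x + 1
            = pc x + ((n :: rest'.take k').count x) + 1 := by
          rcases eq_or_ne x n with h | h
          · subst h; simp; omega
          · simp [h, Ne.symm h]
        rw [harg]

-- indices (as Python ints) at which s occurs in l, when l is enumerated from c
def idxsG (c : Nat) (l : List String) (s : String) : List Int :=
  ((PySem.List.enumerate l (c : Int)).filter (fun p => p.2 == s)).map (·.1)

lemma idxsG_nil (c : Nat) (s : String) : idxsG c [] s = [] := by
  simp [idxsG, PySem.List.enumerate_nil]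

lemma idxsG_cons (c : Nat) (n : String) (rest : List String) (s : String) :
    idxsG c (n :: rest) s
      = (if n = s then [(c : Int)] else []) ++ idxsG (c + 1) rest s := by
  unfold idxsG
  rw [PySem.List.enumerate_cons, List.filter_cons]
  have h1 : ((c : Int) + 1) = ((c + 1 : Nat) : Int) := by omega
  rw [h1]
  rcases eq_or_ne n s with h | h
  · simp [h]
  · simp [h]

lemma length_idxsG (s : String) :
    ∀ (l : List String) (c : Nat), (idxsG c l s).length = l.count s := by
  intro l
  induction l with
  | nil => intro c; simp [idxsG_nil]
  | cons n rest ih =>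
    intro c
    rw [idxsG_cons]
    rcases eq_or_ne n s with h | h
    · simp [h, ih]
    · simp [h, ih]

lemma setFold_length (s : String) :
    ∀ (ps : List (Int × Int)) (res : List String),
    (ps.foldl (fun r q => PySem.List.pySetD r q.2 (mkSuffixed s q.1)) res).length
      = res.length := by
  intro ps
  induction ps with
  | nil => intro res; simp
  | cons q ps' ih => intro res; rw [List.foldl_cons, ih, PySem.List.length_pySetD]

lemma getset (res : List String) (c k : Nat) (v : String) :
    (res.set c v)[k]? = if c = k ∧ c < res.length then some v else res[k]? := by
  rcases eq_or_ne c k with h | h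
  · subst h
    by_cases hl : c < res.length
    · simp [hl]
    · simp [hl]
  · simp [h]

lemma innerFill (s : String) :
    ∀ (l : List String) (c : Nat) (j0 : Int) (res : List String) (k : Nat),
    ((PySem.List.enumerate (idxsG c l s) j0).foldl
        (fun r q => PySem.List.pySetD r q.2 (mkSuffixed s q.1)) res)[k]?
      = if c ≤ k ∧ k - c < l.length ∧ l[k - c]? = some s ∧ k < res.length
        then some (mkSuffixed s (j0 + ((l.take (k - c)).count s : Int)))
        else res[k]? := by
  intro l
  induction l with
  | nil =>
    intro c j0 res k
    rw [idxsG_nil]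
    simp [PySem.List.enumerate_nil]
  | cons n rest ih =>
    intro c j0 res k
    rw [idxsG_cons]
    rcases eq_or_ne n s with h | h
    · subst h
      rw [if_pos rfl, List.singleton_append, PySem.List.enumerate_cons]
      simp only [List.foldl_cons]
      have hset : PySem.List.pySetD res ((c : Nat) : Int) (mkSuffixed n j0)
          = res.set c (mkSuffixed n j0) := by simp
      rw [hset, ih (c + 1) (j0 + 1) _ k]
      rcases Nat.lt_trichotomy k c with h1 | h1 | h1
      · rw [if_neg (fun hc => by omega), if_neg (fun hc => by omega)]
        rw [getset]
        rw [if_neg (fun hc => by omega)]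
      · subst h1
        rw [if_neg (fun hc => by omega), getset]
        by_cases hlen : k < res.length
        · rw [if_pos ⟨rfl, hlen⟩,
              if_pos ⟨Nat.le_refl k, by simp, by simp, hlen⟩]
          simp
        · rw [if_neg (fun hc => hlen hc.2), if_neg (fun hc => hlen hc.2.2.2)]
      · have e1 : k - c = (k - (c + 1)) + 1 := by omega
        have hgl : (n :: rest)[k - c]? = rest[k - (c + 1)]? := by
          rw [e1]; simp
        have hlen2 : (res.set c (mkSuffixed n j0)).length = res.length := by simp
        by_cases hcond : c + 1 ≤ k ∧ k - (c + 1) < rest.length ∧ rest[k - (c + 1)]? = some n ∧ k < res.length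
        · obtain ⟨hc1, hc2, hc3, hc4⟩ := hcond
          rw [if_pos (by rw [hlen2]; exact ⟨hc1, hc2, hc3, hc4⟩),
              if_pos ⟨by omega, by rw [List.length_cons]; omega,
                      by rw [hgl]; exact hc3, hc4⟩]
          have htake : (n :: rest).take (k - c) = n :: rest.take (k - (c + 1)) := by
            rw [e1]; simp
          rw [htake]
          have hcc : List.count n (n :: List.take (k - (c + 1)) rest)
              = List.count n (List.take (k - (c + 1)) rest) + 1 := by
            simp
          rw [hcc]
          congr 2
          push_cast
          ring
        · rw [if_neg (by rw [hlen2]; exact hcond),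
              if_neg (fun hc => hcond ⟨by omega, by
                  have := hc.2.1
                  rw [List.length_cons] at this
                  omega, by rw [← hgl]; exact hc.2.2.1, hc.2.2.2⟩),
              getset, if_neg (fun hc => by omega)]
    · rw [if_neg h, List.nil_append, ih (c + 1) j0 res k]
      rcases Nat.lt_trichotomy k c with h1 | h1 | h1
      · rw [if_neg (fun hc => by omega), if_neg (fun hc => by omega)]
      · subst h1
        rw [if_neg (fun hc => by omega)]
        rw [if_neg (fun hc => h (by
          have h3 := hc.2.2.1
          rw [Nat.sub_self] at h3
          simp only [List.getElem?_cons_zero, Option.some.injEq] at h3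
          exact h3))]
      · have e1 : k - c = (k - (c + 1)) + 1 := by omega
        have hgl : (n :: rest)[k - c]? = rest[k - (c + 1)]? := by rw [e1]; simp
        have htake : (n :: rest).take (k - c) = n :: rest.take (k - (c + 1)) := by
          rw [e1]; simp
        by_cases hcond : c + 1 ≤ k ∧ k - (c + 1) < rest.length ∧ rest[k - (c + 1)]? = some s ∧ k < res.length
        · obtain ⟨hc1, hc2, hc3, hc4⟩ := hcond
          rw [if_pos ⟨hc1, hc2, hc3, hc4⟩,
              if_pos ⟨by omega, by rw [List.length_cons]; omega,
                      by rw [hgl]; exact hc3, hc4⟩]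
          rw [htake]
          have hcc : List.count s (n :: List.take (k - (c + 1)) rest)
              = List.count s (List.take (k - (c + 1)) rest) := by
            simp [h]
          rw [hcc]
        · rw [if_neg hcond,
              if_neg (fun hc => hcond ⟨by omega, by
                  have := hc.2.1
                  rw [List.length_cons] at this
                  omega, by rw [← hgl]; exact hc.2.2.1, hc.2.2.2⟩)]

lemma outer_length (full : List String) :
    ∀ (ds : List String) (res : List String),
    (ds.foldl (fun r s => if (idxsG 0 full s).length > 1 then
          (PySem.List.enumerate (idxsG 0 full s) 1).foldl
            (fun r q => PySem.List.pySetD r q.2 (mkSuffixed s q.1)) r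
        else r) res).length = res.length := by
  intro ds
  induction ds with
  | nil => intro res; simp
  | cons s ds' ih =>
    intro res
    rw [List.foldl_cons, ih]
    by_cases h : (idxsG 0 full s).length > 1 <;> simp [h, setFold_length]

lemma outerFill (full : List String) :
    ∀ (ds : List String) (res : List String), res.length = full.length → ds.Nodup →
    ∀ (k : Nat) (hk : k < full.length),
    (ds.foldl (fun r s => if (idxsG 0 full s).length > 1 then
          (PySem.List.enumerate (idxsG 0 full s) 1).foldl
            (fun r q => PySem.List.pySetD r q.2 (mkSuffixed s q.1)) r
        else r) res)[k]?
      = if full[k] ∈ ds ∧ 1 < full.count full[k]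
        then some (mkSuffixed full[k] (((full.take k).count full[k] + 1 : Nat) : Int))
        else res[k]? := by
  intro ds
  induction ds with
  | nil =>
    intro res hlen _ k hk
    simp
  | cons s ds' ih =>
    intro res hlen hnd k hk
    obtain ⟨hsnot, hnd'⟩ := List.nodup_cons.mp hnd
    simp only [List.foldl_cons]
    by_cases hdup : (idxsG 0 full s).length > 1
    · rw [if_pos hdup]
      have hdupc : 1 < full.count s := by rw [length_idxsG] at hdup; exact hdup
      have hlen1 : ((PySem.List.enumerate (idxsG 0 full s) 1).foldl
          (fun r q => PySem.List.pySetD r q.2 (mkSuffixed s q.1)) res).length = full.length := by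
        rw [setFold_length, hlen]
      rw [ih _ hlen1 hnd' k hk]
      have hres1k := innerFill s full 0 1 res k
      simp only [Nat.sub_zero] at hres1k
      rw [hres1k]
      by_cases hks : full[k] = s
      · rw [if_neg (fun hc => hsnot (hks ▸ hc.1))]
        rw [if_pos ⟨Nat.zero_le k, hk, by rw [List.getElem?_eq_getElem hk, hks], by omega⟩]
        rw [if_pos ⟨by simp [hks], by rw [hks]; exact hdupc⟩]
        rw [hks]
        have hval : (1 : Int) + (List.count s (List.take k full) : Int)
            = ((List.count s (List.take k full) + 1 : Nat) : Int) := by push_cast; ring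
        rw [hval]
      · have hcondeq : (full[k] ∈ s :: ds' ∧ 1 < full.count full[k])
            ↔ (full[k] ∈ ds' ∧ 1 < full.count full[k]) := by
          constructor
          · rintro ⟨hm, hd⟩
            rcases List.mem_cons.mp hm with h | h
            · exact absurd h hks
            · exact ⟨h, hd⟩
          · rintro ⟨hm, hd⟩; exact ⟨List.mem_cons_of_mem _ hm, hd⟩
        have hcond : ¬ (0 ≤ k ∧ k < full.length ∧ full[k]? = some s ∧ k < res.length) := by
          intro hc
          apply hks
          have h3 := hc.2.2.1
          rw [List.getElem?_eq_getElem hk] at h3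
          exact Option.some.inj h3
        rw [if_neg hcond]
        by_cases hc2 : full[k] ∈ ds' ∧ 1 < full.count full[k]

        · rw [if_pos hc2, if_pos (hcondeq.mpr hc2)]
        · rw [if_neg hc2, if_neg (fun hc => hc2 (hcondeq.mp hc))]
    · rw [if_neg hdup, ih res hlen hnd' k hk]
      have hnd1 : ¬ 1 < full.count s := by rw [length_idxsG] at hdup; exact hdup
      by_cases hks : full[k] = s
      · rw [if_neg (fun hc => hnd1 (hks ▸ hc.2)), if_neg (fun hc => hnd1 (hks ▸ hc.2))]
      · by_cases hc2 : full[k] ∈ ds' ∧ 1 < full.count full[k]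
        · rw [if_pos hc2, if_pos ⟨List.mem_cons_of_mem _ hc2.1, hc2.2⟩]
        · rw [if_neg hc2, if_neg (fun hc => hc2 ⟨by
            rcases List.mem_cons.mp hc.1 with h | h
            · exact absurd h hks
            · exact h, hc.2⟩)]

lemma groups_items (full : List String) :
    ((PySem.List.enumerate full).foldl
        (fun g p => g.modify p.2 [] (fun l => l ++ [p.1])) PySem.Dict.empty).items
      = (PySem.Set.ofList full).map (fun s => (s, idxsG 0 full s)) := by
  have hnd : ((PySem.List.enumerate full).foldl
      (fun g p => g.modify p.2 [] (fun l => l ++ [p.1])) PySem.Dict.empty).keys.Nodup := by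
    exact PySem.Dict.nodup_keys_foldl_modify_key _ _ _ _ _ (by simp [PySem.Dict.keys_empty])
  have hkeys : ((PySem.List.enumerate full).foldl
      (fun g p => g.modify p.2 [] (fun l => l ++ [p.1])) PySem.Dict.empty).keys
      = PySem.Set.ofList full := by
    rw [PySem.Dict.keys_foldl_modify_key]
    rw [PySem.List.map_snd_enumerate]
    simp [PySem.Dict.keys_empty, PySem.Set.update_nil_left]
  have hgetD : ∀ s, ((PySem.List.enumerate full).foldl
      (fun g p => g.modify p.2 [] (fun l => l ++ [p.1])) PySem.Dict.empty).getD s []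
      = idxsG 0 full s := by
    intro s
    have hfm : (PySem.List.enumerate full).foldl
        (fun g p => g.modify p.2 [] (fun l => l ++ [p.1])) PySem.Dict.empty
        = ((PySem.List.enumerate full).map (fun p => (p.2, p.1))).foldl
            (fun g p => g.modify p.1 [] (fun l => l ++ [p.2])) PySem.Dict.empty := by
      rw [List.foldl_map]
    rw [hfm, PySem.Dict.getD_foldl_modify_append, PySem.Dict.getD_empty, List.nil_append]
    rw [List.filter_map]
    unfold idxsG
    rw [List.map_map]
    simp [Function.comp_def]
  rw [PySem.Dict.items_eq_map_keys _ hnd ([] : List Int), hkeys]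
  apply List.map_congr_left
  intro s _
  rw [hgetD s]

-- ===== VERDICT (by name: the statement is the Claim_ definition above) =====
theorem make_unique_fieldnames_spec : Claim_equal_make_unique_fieldnames := by
  intro full _
  unfold Spec_make_unique_fieldnames
  rw [A_eq_foldl]
  have hA := A_gen full full [] [] PySem.Dict.empty rfl
    (by intro s _; simp [PySem.Dict.contains_empty, PySem.Dict.getD_empty])
  simp only [List.nil_append, List.count_nil] at hA
  rw [hA]
  simp only [make_unique_fieldnames_alt]
  rw [groups_items full]
  have hfold : ((PySem.Set.ofList full).map (fun s => (s, idxsG 0 full s))).foldl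
      (fun (result : List String) pair =>
        if pair.2.length > 1 then
          (PySem.List.enumerate pair.2 1).foldl
            (fun r q => PySem.List.pySetD r q.2 (mkSuffixed pair.1 q.1)) result
        else result) full
      = (PySem.Set.ofList full).foldl (fun r s => if (idxsG 0 full s).length > 1 then
          (PySem.List.enumerate (idxsG 0 full s) 1).foldl
            (fun r q => PySem.List.pySetD r q.2 (mkSuffixed s q.1)) r
        else r) full := by
    rw [List.foldl_map]
  rw [hfold]
  apply List.ext_getElem?
  intro k
  by_cases hk : k < full.length
  · rw [bAux_getElem? full full _ k hk]
    rw [outerFill full (PySem.Set.ofList full) full rfl (PySem.Set.nodup_ofList full) k hk]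
    have hmem : full[k] ∈ PySem.Set.ofList full := by
      rw [PySem.Set.mem_ofList]
      exact List.getElem_mem hk
    have hcnt1 : 1 ≤ full.count full[k] := List.one_le_count_iff.mpr (List.getElem_mem hk)
    rw [List.getElem?_eq_getElem hk]
    simp only [Option.map_some]
    by_cases hdup : 1 < full.count full[k]
    · rw [if_pos ⟨hmem, hdup⟩]
      unfold mkF
      rw [if_neg (by omega)]
      congr 2
      omega
    · rw [if_neg (fun hc => hdup hc.2)]
      unfold mkF
      rw [if_pos (by omega)]
  · rw [List.getElem?_eq_none (by rw [bAux_length]; omega),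
        List.getElem?_eq_none (by rw [outer_length]; omega)]
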